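-- pv_equiv track=rewrite | github.com/chm10/MO443 | projeto4/app.py | phrasetobyte
-- ===== SOURCE A (Python) =====
-- def phrasetobyte(_phrase):
--     """
--     Essa função é responsável por pegar uma variavel string  e converter cada palavra
--     em representação de byte e colocar numa lista.
--     """
--     _phrase = bytearray(_phrase,"utf8")
--     _string = []
--     for i in list(bytes(_phrase)):
--         _byte = []
--         while (i>0):
--             _byte.append(i%2)
--             i = i//2
--         while(len(_byte) < 8):
--             _byte.append(0)
--         _byte.reverse()
--         _string.append(_byte)
--     return _string
-- ===== SOURCE B (Python) =====
-- def phrasetobyte(_phrase):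
--     return [[b // 2**k % 2 for k in range(7, -1, -1)]
--             for b in bytes(bytearray(_phrase, "utf8"))]
-- ===== Notes on version B (the rewrite author's own statement) =====
-- stated objective: simpler
-- what changed: Replaces the extract-bits/pad/reverse while-loops per byte with a direct MSB-first comprehension b // 2**k % 2 over k = 7..0.
import Mathlib
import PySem

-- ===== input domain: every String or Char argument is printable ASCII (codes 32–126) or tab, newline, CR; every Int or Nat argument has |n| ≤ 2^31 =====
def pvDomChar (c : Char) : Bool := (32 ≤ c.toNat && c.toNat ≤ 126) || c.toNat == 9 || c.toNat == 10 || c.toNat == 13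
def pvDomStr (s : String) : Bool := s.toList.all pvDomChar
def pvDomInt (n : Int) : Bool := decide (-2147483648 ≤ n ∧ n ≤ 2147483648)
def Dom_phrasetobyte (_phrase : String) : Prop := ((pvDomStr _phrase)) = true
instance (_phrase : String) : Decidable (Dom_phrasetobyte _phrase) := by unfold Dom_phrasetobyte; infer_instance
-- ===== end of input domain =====

-- B replaces A's per-byte extract/pad/reverse while-loops with a direct MSB-first comprehension (objective: simpler).
-- bytearray(_phrase,"utf8"): on Dom every char code is < 128, so the utf8 bytes are exactly the char codes;
-- both ports encode it as toList.map (c.toNat : Int) — exact on the stated ASCII domain.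

-- ===== PORT A =====
-- while (i>0): _byte.append(i%2); i = i//2   — fuel i.toNat suffices since i halves each step
def pvBitsLoop (fuel : Nat) (i : Int) (acc : List Int) : List Int :=
  match fuel with
  | 0 => acc
  | f+1 => if 0 < i then pvBitsLoop f (PySem.Int.floordiv i 2) (acc ++ [PySem.Int.mod i 2]) else acc

-- while (len(_byte) < 8): _byte.append(0)    — fuel 8 suffices since length grows by 1 each step
def pvPadLoop (fuel : Nat) (b : List Int) : List Int :=
  match fuel with
  | 0 => b
  | f+1 => if b.length < 8 then pvPadLoop f (b ++ [0]) else b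

def phrasetobyte (_phrase : String) : List (List Int) :=
  (_phrase.toList.map (fun c => (c.toNat : Int))).map
    (fun i => (pvPadLoop 8 (pvBitsLoop i.toNat i [])).reverse)

-- ===== PORT B =====
def phrasetobyte_alt (_phrase : String) : List (List Int) :=
  (_phrase.toList.map (fun c => (c.toNat : Int))).map
    (fun b => (PySem.List.pyRange 7 (-1) (-1)).map
      (fun k => PySem.Int.mod (PySem.Int.floordiv b (2 ^ k.toNat)) 2))

-- ===== PRECONDITION & SPEC =====
def Spec_phrasetobyte (_phrase : String) (out : List (List Int)) : Prop := out = phrasetobyte_alt _phrase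
instance (_phrase : String) (out : List (List Int)) : Decidable (Spec_phrasetobyte _phrase out) := by unfold Spec_phrasetobyte; infer_instance

-- ===== CLAIM (what is proved, stated in full; the proofs are below) =====
def Claim_equal_phrasetobyte : Prop := ∀ (_phrase : String), Dom_phrasetobyte _phrase → Spec_phrasetobyte _phrase (phrasetobyte _phrase)

-- ===== LEMMAS AND PROOFS =====

-- ===== VERDICT (by name: the statement is the Claim_ definition above) =====
-- the two per-byte computations agree on every byte value a Dom string can produce
theorem pv_byte_eq : ∀ n : Nat, n < 128 →
    (pvPadLoop 8 (pvBitsLoop n (n : Int) [])).reverse =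
      (PySem.List.pyRange 7 (-1) (-1)).map
        (fun k => PySem.Int.mod (PySem.Int.floordiv (n : Int) (2 ^ k.toNat)) 2) := by
  decide

theorem phrasetobyte_spec : Claim_equal_phrasetobyte := by
  intro s hdom
  unfold Spec_phrasetobyte phrasetobyte phrasetobyte_alt
  simp only [List.map_map]
  refine List.map_congr_left (fun c hc => ?_)
  have hd : pvDomChar c = true := List.all_eq_true.mp hdom c hc
  have h128 : c.toNat < 128 := by
    simp [pvDomChar] at hd; omega
  simpa using pv_byte_eq c.toNat h128
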